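-- pv_equiv track=rewrite | github.com/leon332157/grail-py3 | grail/grailbase/utils.py | _parse_mimetypeoptions
-- ===== SOURCE A (Python) =====
-- def _parse_mimetypeoptions(options):
--     opts = {}
--     while options:
--         name, sep, value = options.partition('=')
--         if sep:
--             name = name.strip().lower()
--             value, _, options = value.partition(';')
--             value = value.strip()
--             if name:
--                 opts[name] = value
--         else:
--             options = None
--     return opts
-- ===== SOURCE B (Python) =====
-- def _parse_mimetypeoptions(options):
--     opts = {}
--     name_acc = []
--     val_acc = []
--     in_value = False
--     for ch in options:
--         if not in_value:
--             if ch == '=':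
--                 in_value = True
--             else:
--                 name_acc.append(ch)
--         elif ch == ';':
--             name = ''.join(name_acc).strip().lower()
--             if name:
--                 opts[name] = ''.join(val_acc).strip()
--             name_acc = []
--             val_acc = []
--             in_value = False
--         else:
--             val_acc.append(ch)
--     if in_value:
--         name = ''.join(name_acc).strip().lower()
--         if name:
--             opts[name] = ''.join(val_acc).strip()
--     return opts
-- ===== Notes on version B (the rewrite author's own statement) =====
-- stated objective: alternative
-- what changed: Replaced the repeated str.partition('=')/partition(';') while-loop with a single left-to-right character state machine that accumulates the name until '=' and the value until ';' and commits each pair once.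
import Mathlib
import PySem

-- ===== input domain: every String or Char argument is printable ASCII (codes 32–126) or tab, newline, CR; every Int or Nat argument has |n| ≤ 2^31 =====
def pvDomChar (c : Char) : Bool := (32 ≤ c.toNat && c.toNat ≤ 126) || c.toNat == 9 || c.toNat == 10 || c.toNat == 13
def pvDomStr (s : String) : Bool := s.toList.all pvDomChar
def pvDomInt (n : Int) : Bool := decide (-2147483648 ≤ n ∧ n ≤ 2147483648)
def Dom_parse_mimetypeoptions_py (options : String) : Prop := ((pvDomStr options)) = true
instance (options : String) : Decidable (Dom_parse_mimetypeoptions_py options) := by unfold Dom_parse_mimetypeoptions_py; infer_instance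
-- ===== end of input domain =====

-- B replaces A's repeated partition('=')/partition(';') while-loop by a one-pass character state machine; same O(n) cost, different structure.

-- ===== PORT A =====
-- str.partition(c) for a 1-char separator is ported by hand, exactly:
-- before = cs.takeWhile (· ≠ c); sep is truthy iff cs.dropWhile (· ≠ c) ≠ []; after = (cs.dropWhile (· ≠ c)).drop 1.
def pyLoopA (cs : List Char) (opts : PySem.Dict String String) : PySem.Dict String String :=
  if _h : cs = [] then opts       -- while options:
  else if _hp : cs.dropWhile (· ≠ '=') = [] then opts   -- sep falsy: options = None, loop ends
  else
    -- name, sep, value = options.partition('=')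
    let name := PySem.Chars.lower (PySem.Chars.strip (cs.takeWhile (· ≠ '=')))
    let value0 := (cs.dropWhile (· ≠ '=')).drop 1
    -- value, _, options = value.partition(';')
    let value := PySem.Chars.strip (value0.takeWhile (· ≠ ';'))
    let rest := (value0.dropWhile (· ≠ ';')).drop 1
    let opts' := if name ≠ [] then opts.insert (String.ofList name) (String.ofList value) else opts
    pyLoopA rest opts'
termination_by cs.length
decreasing_by
  have h1 : (cs.dropWhile (· ≠ '=')).length ≤ cs.length := List.length_dropWhile_le _ _
  have h2 : (((cs.dropWhile (· ≠ '=')).drop 1).dropWhile (· ≠ ';')).length ≤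
      ((cs.dropWhile (· ≠ '=')).drop 1).length := List.length_dropWhile_le _ _
  have _h3 : 0 < cs.length := List.length_pos_iff.mpr _h
  have h4 : 0 < (cs.dropWhile (· ≠ '=')).length := List.length_pos_iff.mpr _hp
  simp only [List.length_drop] at *
  omega

def parse_mimetypeoptions_py (options : String) : List (String × String) :=
  (pyLoopA options.toList PySem.Dict.empty).items

-- ===== PORT B =====
-- commit of one accumulated (name, value) pair: the body shared by the ';' branch and the epilogue
def pvFsmCommit (opts : PySem.Dict String String) (nameAcc valAcc : List Char) : PySem.Dict String String :=
  let name := PySem.Chars.lower (PySem.Chars.strip nameAcc)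
  if name ≠ [] then opts.insert (String.ofList name) (String.ofList (PySem.Chars.strip valAcc)) else opts

-- one step of the state machine; state = (opts, name_acc, val_acc, in_value)
def pvFsmStep (st : PySem.Dict String String × List Char × List Char × Bool) (ch : Char) :
    PySem.Dict String String × List Char × List Char × Bool :=
  let (opts, nameAcc, valAcc, inVal) := st
  if !inVal then
    if ch = '=' then (opts, nameAcc, valAcc, true)
    else (opts, nameAcc ++ [ch], valAcc, false)
  else if ch = ';' then (pvFsmCommit opts nameAcc valAcc, [], [], false)
  else (opts, nameAcc, valAcc ++ [ch], true)

def parse_mimetypeoptions_py_alt (options : String) : List (String × String) :=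
  let st := options.toList.foldl pvFsmStep (PySem.Dict.empty, [], [], false)
  (if st.2.2.2 then pvFsmCommit st.1 st.2.1 st.2.2.1 else st.1).items

-- ===== PRECONDITION & SPEC =====
def Spec_parse_mimetypeoptions_py (options : String) (out : List (String × String)) : Prop := out = parse_mimetypeoptions_py_alt options
instance (options : String) (out : List (String × String)) : Decidable (Spec_parse_mimetypeoptions_py options out) := by unfold Spec_parse_mimetypeoptions_py; infer_instance

-- ===== CLAIM (what is proved, stated in full; the proofs are below) =====
def Claim_equal_parse_mimetypeoptions_py : Prop := ∀ (options : String), Dom_parse_mimetypeoptions_py options → Spec_parse_mimetypeoptions_py options (parse_mimetypeoptions_py options)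

-- ===== LEMMAS AND PROOFS =====

-- the FSM in name state over '='-free input just accumulates the name
lemma fsm_name_run (cs : List Char) (h : ∀ c ∈ cs, c ≠ '=') (o : PySem.Dict String String)
    (n v : List Char) : cs.foldl pvFsmStep (o, n, v, false) = (o, n ++ cs, v, false) := by
  induction cs generalizing n with
  | nil => simp
  | cons c cs ih =>
    have hc : c ≠ '=' := h c (by simp)
    rw [List.foldl_cons]
    have hstep : pvFsmStep (o, n, v, false) c = (o, n ++ [c], v, false) := by
      simp [pvFsmStep, hc]
    rw [hstep, ih (fun d hd => h d (by simp [hd]))]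
    simp

-- the FSM in value state over ';'-free input just accumulates the value
lemma fsm_value_run (cs : List Char) (h : ∀ c ∈ cs, c ≠ ';') (o : PySem.Dict String String)
    (n v : List Char) : cs.foldl pvFsmStep (o, n, v, true) = (o, n, v ++ cs, true) := by
  induction cs generalizing v with
  | nil => simp
  | cons c cs ih =>
    have hc : c ≠ ';' := h c (by simp)
    rw [List.foldl_cons]
    have hstep : pvFsmStep (o, n, v, true) c = (o, n, v ++ [c], true) := by
      simp [pvFsmStep, hc]
    rw [hstep, ih (fun d hd => h d (by simp [hd]))]
    simp

-- A's partition loop computes exactly the finished FSM fold, from any dict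
lemma loop_eq_fsm (N : Nat) : ∀ cs : List Char, cs.length ≤ N → ∀ opts : PySem.Dict String String,
    pyLoopA cs opts =
      (let st := cs.foldl pvFsmStep (opts, [], [], false);
       if st.2.2.2 then pvFsmCommit st.1 st.2.1 st.2.2.1 else st.1) := by
  induction N with
  | zero =>
    intro cs hlen opts
    have : cs = [] := List.length_eq_zero_iff.mp (Nat.le_zero.mp hlen)
    subst this
    simp [pyLoopA]
  | succ N ih =>
    intro cs hlen opts
    by_cases hnil : cs = []
    · subst hnil; simp [pyLoopA]
    · have hname : ∀ c ∈ cs.takeWhile (· ≠ '='), c ≠ '=' := by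
        intro c hc
        simpa using List.mem_takeWhile_imp hc
      rw [pyLoopA, dif_neg hnil]
      rcases hpost : cs.dropWhile (· ≠ '=') with _ | ⟨e, value0⟩
      · -- no '=': A stops; the FSM stays in name state and discards the accumulator
        rw [dif_pos rfl]
        have hcs : cs = cs.takeWhile (· ≠ '=') := by
          conv_lhs => rw [← List.takeWhile_append_dropWhile (p := (· ≠ '=')) (l := cs)]
          rw [hpost, List.append_nil]
        conv_rhs => rw [hcs]
        rw [fsm_name_run _ hname]
        simp
      · have he : e = '=' := by
          have := List.head?_dropWhile_not (p := (· ≠ '=')) (l := cs)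
          rw [hpost] at this
          simpa using this
        subst he
        rw [dif_neg (List.cons_ne_nil _ _)]
        simp only [List.drop_succ_cons, List.drop_zero]
        have hsplit : cs = cs.takeWhile (· ≠ '=') ++ '=' :: value0 := by
          conv_lhs => rw [← List.takeWhile_append_dropWhile (p := (· ≠ '=')) (l := cs)]
          rw [hpost]
        have hval : ∀ c ∈ value0.takeWhile (· ≠ ';'), c ≠ ';' := by
          intro c hc
          simpa using List.mem_takeWhile_imp hc
        have hlen0 : value0.length + 1 ≤ cs.length := by
          have h1 : (cs.dropWhile (· ≠ '=')).length ≤ cs.length := List.length_dropWhile_le _ _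
          rw [hpost] at h1; simpa using h1
        have hstep : pvFsmStep (opts, cs.takeWhile (· ≠ '='), [], false) '=' =
            (opts, cs.takeWhile (· ≠ '='), [], true) := by simp [pvFsmStep]
        rcases hpost2 : value0.dropWhile (· ≠ ';') with _ | ⟨s, rest⟩
        · -- no ';' in value0: A's next options is '' (the loop then stops); the FSM ends in value state and commits
          have hv0 : value0 = value0.takeWhile (· ≠ ';') := by
            conv_lhs => rw [← List.takeWhile_append_dropWhile (p := (· ≠ ';')) (l := value0)]
            rw [hpost2, List.append_nil]
          rw [List.drop_nil, pyLoopA, dif_pos rfl]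
          conv_rhs => rw [hsplit]
          rw [List.foldl_append, fsm_name_run _ hname]
          simp only [List.nil_append]
          rw [List.foldl_cons, hstep]
          conv_rhs => rw [hv0]
          rw [fsm_value_run _ hval]
          simp [pvFsmCommit]
        · have hs : s = ';' := by
            have := List.head?_dropWhile_not (p := (· ≠ ';')) (l := value0)
            rw [hpost2] at this
            simpa using this
          subst hs
          have hsplit2 : value0 = value0.takeWhile (· ≠ ';') ++ ';' :: rest := by
            conv_lhs => rw [← List.takeWhile_append_dropWhile (p := (· ≠ ';')) (l := value0)]
            rw [hpost2]
          have hlen2 : rest.length ≤ N := by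
            have h2 : (value0.dropWhile (· ≠ ';')).length ≤ value0.length := List.length_dropWhile_le _ _
            rw [hpost2] at h2
            simp only [List.length_cons] at h2
            omega
          simp only [List.drop_succ_cons, List.drop_zero]
          conv_rhs => rw [hsplit]
          rw [List.foldl_append, fsm_name_run _ hname]
          simp only [List.nil_append]
          rw [List.foldl_cons, hstep]
          conv_rhs => rw [hsplit2]
          rw [List.foldl_append, fsm_value_run _ hval]
          simp only [List.nil_append]
          rw [List.foldl_cons]
          have hstep2 : pvFsmStep (opts, cs.takeWhile (· ≠ '='), value0.takeWhile (· ≠ ';'), true) ';' =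
              (pvFsmCommit opts (cs.takeWhile (· ≠ '=')) (value0.takeWhile (· ≠ ';')), [], [], false) := by
            simp [pvFsmStep]
          rw [hstep2, ih rest hlen2]
          simp [pvFsmCommit]

-- ===== VERDICT (by name: the statement is the Claim_ definition above) =====
theorem parse_mimetypeoptions_py_spec : Claim_equal_parse_mimetypeoptions_py := by
  intro options _
  unfold Spec_parse_mimetypeoptions_py parse_mimetypeoptions_py parse_mimetypeoptions_py_alt
  rw [loop_eq_fsm options.toList.length options.toList le_rfl]
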